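-- pv_equiv track=rewrite | github.com/TheBehst/Prob1_GEI723 | GEI723/Main.py | delay_maker
-- ===== SOURCE A (Python) =====
-- def delay_maker(N, start, delay):
--     result = []
--     for i in range(N):
--         if i % 4 == 0 or i % 4 == 3:
--             result.append(start)
--         else:
--             result.append(start + delay)
--     return result
-- ===== SOURCE B (Python) =====
-- def delay_maker(N, start, delay):
--     block = [start, start + delay, start + delay, start]
--     return (block * (N // 4 + 1))[:N]
-- ===== Notes on version B (the rewrite author's own statement) =====
-- stated objective: faster
-- what changed: B recognises the output as periodic with period 4: it builds the one 4-element block and tiles/truncates it with list repetition and a slice, instead of looping over every index and testing i % 4.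
import Mathlib
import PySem

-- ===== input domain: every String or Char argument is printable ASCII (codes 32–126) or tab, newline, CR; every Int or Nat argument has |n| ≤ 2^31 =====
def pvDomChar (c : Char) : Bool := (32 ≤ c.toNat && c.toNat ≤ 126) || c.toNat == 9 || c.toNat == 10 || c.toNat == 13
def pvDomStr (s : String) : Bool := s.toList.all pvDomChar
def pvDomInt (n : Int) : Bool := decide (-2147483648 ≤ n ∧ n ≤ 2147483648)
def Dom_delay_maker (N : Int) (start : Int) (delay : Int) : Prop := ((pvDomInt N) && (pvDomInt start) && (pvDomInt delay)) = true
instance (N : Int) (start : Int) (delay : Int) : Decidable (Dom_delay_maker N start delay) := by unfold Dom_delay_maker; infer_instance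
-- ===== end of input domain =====

-- B replaces the per-index loop with one 4-element period block tiled and truncated (objective: simpler).

-- ===== PORT A =====
-- for i in range(N): append start if i%4 in {0,3} else start+delay
def delay_maker (N : Int) (start : Int) (delay : Int) : List Int :=
  (PySem.List.pyRange 0 N 1).foldl
    (fun result i =>
      if PySem.Int.mod i 4 = 0 ∨ PySem.Int.mod i 4 = 3 then result ++ [start]
      else result ++ [start + delay]) []

-- ===== PORT B =====
-- block * m : Python list repetition yields [] for m ≤ 0, matched by Int.toNat clamping
def delay_maker_alt (N : Int) (start : Int) (delay : Int) : List Int :=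
  let block : List Int := [start, start + delay, start + delay, start]
  PySem.List.slice ((List.replicate (PySem.Int.floordiv N 4 + 1).toNat block).flatten) none (some N)

-- ===== PRECONDITION & SPEC =====
def Spec_delay_maker (N : Int) (start : Int) (delay : Int) (out : List Int) : Prop := out = delay_maker_alt N start delay
instance (N : Int) (start : Int) (delay : Int) (out : List Int) : Decidable (Spec_delay_maker N start delay out) := by unfold Spec_delay_maker; infer_instance

-- ===== CLAIM (what is proved, stated in full; the proofs are below) =====
def Claim_equal_delay_maker : Prop := ∀ (N : Int) (start : Int) (delay : Int), Dom_delay_maker N start delay → Spec_delay_maker N start delay (delay_maker N start delay)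

-- ===== LEMMAS AND PROOFS =====

-- the common per-index value, Nat-indexed
def pvCell (start delay : Int) (i : Nat) : Int :=
  if i % 4 = 0 ∨ i % 4 = 3 then start else start + delay

theorem pvCell_add_four (start delay : Int) (i : Nat) :
    pvCell start delay (4 + i) = pvCell start delay i := by
  simp [pvCell, Nat.add_mod_left]

-- A's loop is the map of pvCell over range
theorem pv_foldl_map (start delay : Int) (l : List Int) (acc : List Int) :
    l.foldl (fun result i =>
      if PySem.Int.mod i 4 = 0 ∨ PySem.Int.mod i 4 = 3 then result ++ [start]
      else result ++ [start + delay]) acc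
    = acc ++ l.map (fun i =>
        if PySem.Int.mod i 4 = 0 ∨ PySem.Int.mod i 4 = 3 then start else start + delay) := by
  induction l generalizing acc with
  | nil => simp
  | cons x xs ih =>
      rw [List.foldl_cons, List.map_cons, ih]
      split <;> simp

theorem pvCell_cast (start delay : Int) (k : Nat) :
    (if PySem.Int.mod (0 + (k : Int)) 4 = 0 ∨ PySem.Int.mod (0 + (k : Int)) 4 = 3 then start
     else start + delay) = pvCell start delay k := by
  rw [pvCell]
  rw [PySem.Int.mod_eq_emod_of_pos (by omega : (0:Int) < 4)]
  have : (0 + (k : Int)) % 4 = ((k % 4 : Nat) : Int) := by push_cast; omega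
  rw [this]
  by_cases h : k % 4 = 0 ∨ k % 4 = 3
  · rw [if_pos (by omega : ((k % 4 : Nat) : Int) = 0 ∨ ((k % 4 : Nat) : Int) = 3), if_pos h]
  · rw [if_neg (by omega : ¬(((k % 4 : Nat) : Int) = 0 ∨ ((k % 4 : Nat) : Int) = 3)), if_neg h]

theorem delay_maker_eq_map (N start delay : Int) :
    delay_maker N start delay = (List.range (N - 0).toNat).map (pvCell start delay) := by
  rw [delay_maker, pv_foldl_map, PySem.List.pyRange_one, List.map_map]
  simp only [List.nil_append, Function.comp_def]
  exact List.map_congr_left (fun k _ => pvCell_cast start delay k)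

-- the tiled block is the map of pvCell over a multiple-of-4 range
theorem pv_tile (start delay : Int) (k : Nat) :
    (List.replicate k ([start, start + delay, start + delay, start])).flatten
      = (List.range (4 * k)).map (pvCell start delay) := by
  induction k with
  | zero => simp
  | succ k ih =>
      have h : 4 * (k + 1) = 4 + 4 * k := by omega
      rw [List.replicate_succ, List.flatten_cons, ih, h, List.range_add, List.map_append,
        List.map_map]
      have hblock : [start, start + delay, start + delay, start]
          = (List.range 4).map (pvCell start delay) := by
        simp [List.range_succ, pvCell]
      rw [hblock]
      congr 1
      exact List.map_congr_left (fun i _ => (pvCell_add_four start delay i).symm)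

-- ===== VERDICT (by name: the statement is the Claim_ definition above) =====
theorem delay_maker_spec : Claim_equal_delay_maker := by
  intro N start delay _
  unfold Spec_delay_maker delay_maker_alt
  rcases le_or_gt 0 N with hN | hN
  · -- N = (n : Nat)
    obtain ⟨n, rfl⟩ : ∃ n : Nat, N = (n : Int) := ⟨N.toNat, (Int.toNat_of_nonneg hN).symm⟩
    have hm : PySem.Int.floordiv (n : Int) 4 + 1 = ((n / 4 + 1 : Nat) : Int) := by
      rw [PySem.Int.floordiv_eq_ediv_of_pos (by omega : (0:Int) < 4)]
      push_cast
      omega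
    have hn : ((n : Int) - 0).toNat = n := by omega
    rw [delay_maker_eq_map, hm, hn]
    simp only [Int.toNat_natCast]
    rw [pv_tile, PySem.List.slice_to_natCast, ← List.map_take, List.take_range]
    have : min n (4 * (n / 4 + 1)) = n := by omega
    rw [this]
  · -- N < 0 : both sides empty
    rw [delay_maker, PySem.List.pyRange_one_eq_nil (by omega), List.foldl_nil]
    have hm : (PySem.Int.floordiv N 4 + 1).toNat = 0 := by
      have : PySem.Int.floordiv N 4 < 0 := by
        rw [PySem.Int.floordiv_eq_ediv_of_pos (by omega : (0:Int) < 4)]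
        omega
      omega
    rw [hm]
    simp [PySem.List.slice, PySem.List.clampIdx]
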